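-- pv_equiv track=rewrite | github.com/hon9g/algorithms | Codility/Triangle.py | solution
-- ===== SOURCE A (Python) =====
-- def solution(A):
--     N = len(A)
--     if N < 3:
--         return 0
--     A = sorted(A)
--     for P in range(N-2):
--         Q, R = P+1, P+2
--         if A[P] < A[Q] + A[R] and A[Q] < A[P] + A[R] and A[R] < A[Q] + A[P]:
--             return 1
--     return 0
-- ===== SOURCE B (Python) =====
-- def solution(A):
--     xs = list(A)
--     while xs:
--         a, xs = xs[0], xs[1:]
--         ys = xs
--         while ys:
--             b, ys = ys[0], ys[1:]
--             for c in ys: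
--                 if a + b > c and a + c > b and b + c > a:
--                     return 1
--     return 0
-- ===== Notes on version B (the rewrite author's own statement) =====
-- stated objective: alternative
-- what changed: Drops the sort-then-adjacent-scan entirely: B brute-forces all unordered triples of the original array, testing the full three-way triangle inequality and returning 1 on the first hit; equivalence rests on the theorem that a triangle triple exists iff a consecutive triple of the sorted array is one.
import Mathlib
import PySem

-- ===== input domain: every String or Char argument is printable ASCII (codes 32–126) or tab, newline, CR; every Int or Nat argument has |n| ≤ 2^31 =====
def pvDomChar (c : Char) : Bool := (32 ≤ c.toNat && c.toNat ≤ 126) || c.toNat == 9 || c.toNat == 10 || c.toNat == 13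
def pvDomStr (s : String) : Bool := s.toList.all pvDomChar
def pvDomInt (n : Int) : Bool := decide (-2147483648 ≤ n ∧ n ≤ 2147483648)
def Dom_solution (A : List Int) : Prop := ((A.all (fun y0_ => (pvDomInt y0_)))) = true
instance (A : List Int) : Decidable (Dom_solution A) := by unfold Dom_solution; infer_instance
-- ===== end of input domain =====

-- B replaces sort-then-adjacent-scan by a brute-force search over all unordered triples
-- of the original array (alternative algorithm, not claimed faster); return values only.

-- ===== PORT A =====
-- the 'for P in range(N-2)' loop with early return, as recursion over the index list
def pvScanA (S : List Int) : List Int → Int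
  | [] => 0
  | P :: rest =>
    let a := PySem.List.pyGetD S P 0
    let b := PySem.List.pyGetD S (P + 1) 0
    let c := PySem.List.pyGetD S (P + 2) 0
    if a < b + c ∧ b < a + c ∧ c < b + a then 1 else pvScanA S rest

def solution (A : List Int) : Int :=
  let N : Int := A.length
  if N < 3 then 0
  else
    let S := PySem.List.sorted A (fun x => x)
    pvScanA S (PySem.List.pyRange 0 (N - 2))

-- ===== PORT B =====
def pvTriB (a b c : Int) : Bool :=
  decide (a + b > c) && decide (a + c > b) && decide (b + c > a)

-- inner 'while ys' loop: pick b, scan the rest for a matching c, else continue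
def pvInnerB (a : Int) : List Int → Bool
  | [] => false
  | b :: ys => ys.any (fun c => pvTriB a b c) || pvInnerB a ys

-- outer 'while xs' loop: pick a, search pairs in the rest, else continue
def solution_alt : List Int → Int
  | [] => 0
  | a :: xs => if pvInnerB a xs then 1 else solution_alt xs

-- ===== PRECONDITION & SPEC =====
def Spec_solution (A : List Int) (out : Int) : Prop := out = solution_alt A
instance (A : List Int) (out : Int) : Decidable (Spec_solution A out) := by unfold Spec_solution; infer_instance

-- ===== CLAIM (what is proved, stated in full; the proofs are below) =====
def Claim_equal_solution : Prop := ∀ (A : List Int), Dom_solution A → Spec_solution A (solution A)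

-- ===== LEMMAS AND PROOFS =====

theorem pvTriB_eq_decide (a b c : Int) :
    pvTriB a b c = decide (a + b > c ∧ a + c > b ∧ b + c > a) := by
  simp [pvTriB, Bool.and_assoc]

theorem pvTriB_swap12 (a b c : Int) : pvTriB a b c = pvTriB b a c := by
  simp only [pvTriB_eq_decide, decide_eq_decide]
  omega

theorem pvTriB_swap23 (a b c : Int) : pvTriB a b c = pvTriB a c b := by
  simp only [pvTriB_eq_decide, decide_eq_decide]
  omega

-- Boolean "A has a triangle triple" (solution_alt as a Bool)
def goodB : List Int → Bool
  | [] => false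
  | a :: xs => pvInnerB a xs || goodB xs

theorem solution_alt_eq_goodB (l : List Int) :
    solution_alt l = if goodB l then 1 else 0 := by
  induction l with
  | nil => rfl
  | cons a xs ih =>
    simp only [solution_alt, goodB, ih]
    by_cases h : pvInnerB a xs = true <;> simp [h]

-- adjacent-triples scan over a list (solution's loop, structurally)
def adjB : List Int → Bool
  | a :: b :: c :: t => pvTriB a b c || adjB (b :: c :: t)
  | _ => false

theorem adjB_short (l : List Int) (h : l.length < 3) : adjB l = false := by
  match l, h with
  | [], _ => rfl
  | [_], _ => rfl
  | [_, _], _ => rfl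

theorem adjB_cons (a : Int) (t : List Int) (h : adjB t = true) : adjB (a :: t) = true := by
  match t, h with
  | b :: c :: t, h => simp [adjB] at h ⊢; tauto

theorem goodB_cons (a : Int) (t : List Int) (h : goodB t = true) : goodB (a :: t) = true := by
  simp [goodB, h]

theorem pvOrShuffle (p q r u : Bool) : ((p || q) || (r || u)) = ((p || r) || (q || u)) := by
  cases p <;> cases q <;> cases r <;> cases u <;> rfl

theorem pvInnerB_perm (a : Int) {t t' : List Int} (h : t.Perm t') :
    pvInnerB a t = pvInnerB a t' := by
  induction h with
  | nil => rfl
  | cons x h ih => simp only [pvInnerB, ih, h.any_eq]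
  | swap x y s =>
    simp only [pvInnerB, List.any_cons]
    rw [pvTriB_swap23 a y x]
    exact pvOrShuffle _ _ _ _
  | trans _ _ ih1 ih2 => rw [ih1, ih2]

theorem goodB_perm {t t' : List Int} (h : t.Perm t') : goodB t = goodB t' := by
  induction h with
  | nil => rfl
  | cons x h ih => simp only [goodB, ih, pvInnerB_perm x h]
  | swap x y s =>
    simp only [goodB, pvInnerB]
    rw [show pvTriB y x = pvTriB x y from funext (fun c => pvTriB_swap12 y x c)]
    exact pvOrShuffle _ _ _ _
  | trans _ _ ih1 ih2 => rw [ih1, ih2]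

theorem pvInnerB_triple (a : Int) (t : List Int) (h : pvInnerB a t = true) :
    ∃ b c, [b, c].Sublist t ∧ pvTriB a b c = true := by
  induction t with
  | nil => simp [pvInnerB] at h
  | cons x s ih =>
    simp only [pvInnerB, Bool.or_eq_true] at h
    rcases h with h | h
    · rcases List.any_eq_true.mp h with ⟨c, hc, htri⟩
      exact ⟨x, c, List.Sublist.cons₂ x ((List.singleton_sublist).mpr hc), htri⟩
    · rcases ih h with ⟨b, c, hs, htri⟩
      exact ⟨b, c, hs.cons x, htri⟩

-- the classical argument: a (not necessarily adjacent) triple b,c below head a of a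
-- sorted list with a+b>c forces an adjacent triangle triple
theorem adj_of_pair : ∀ (t : List Int) (a b c : Int),
    (a :: t).Pairwise (· ≤ ·) → [b, c].Sublist t → a + b > c → adjB (a :: t) = true := by
  intro t
  induction t with
  | nil => intro a b c _ hs; simp at hs
  | cons x t' ih =>
    intro a b c hp hs hgt
    have hax : a ≤ x := (List.pairwise_cons.mp hp).1 x (List.mem_cons_self)
    have hpt : (x :: t').Pairwise (· ≤ ·) := (List.pairwise_cons.mp hp).2
    cases hs with
    | cons _ hs' =>
      -- [b,c] entirely inside t': shift the small element a up to x
      have hb : x ≤ b := by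
        rcases List.pairwise_cons.mp hpt with ⟨hx, _⟩
        exact hx b (hs'.subset (by simp))
      exact adjB_cons a _ (ih x b c hpt hs' (by omega))
    | cons₂ _ hs' =>
      -- b = x is the head of t
      cases t' with
      | nil => simp at hs'
      | cons y t'' =>
        have hxy : x ≤ y := (List.pairwise_cons.mp hpt).1 y (List.mem_cons_self)
        cases hs' with
        | cons₂ _ _ =>
          -- c is the next element: the adjacent triple (a, x, c) itself
          have htri : pvTriB a x c = true := by
            rw [pvTriB_eq_decide]; simp only [decide_eq_true_eq]; omega
          simp [adjB, htri]
        | cons _ hs'' =>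
          -- c deeper: recurse with the triple (x, y, c)
          have hay : a ≤ y := (List.pairwise_cons.mp hp).1 y (by simp)
          exact adjB_cons a _ (ih x y c hpt (List.Sublist.cons₂ y hs'') (by omega))

theorem goodB_of_adjB : ∀ (l : List Int), adjB l = true → goodB l = true := by
  intro l h
  match l, h with
  | a :: b :: c :: t, h =>
    simp only [adjB, Bool.or_eq_true] at h
    rcases h with h | h
    · simp [goodB, pvInnerB, List.any_cons, h]
    · exact goodB_cons a _ (goodB_of_adjB (b :: c :: t) h)

theorem adjB_of_goodB : ∀ (l : List Int), l.Pairwise (· ≤ ·) → goodB l = true → adjB l = true := by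
  intro l
  induction l with
  | nil => intro _ h; simp [goodB] at h
  | cons a t ih =>
    intro hp h
    simp only [goodB, Bool.or_eq_true] at h
    rcases h with h | h
    · rcases pvInnerB_triple a t h with ⟨b, c, hs, htri⟩
      have : a + b > c := by
        rw [pvTriB_eq_decide] at htri; simp only [decide_eq_true_eq] at htri; omega
      exact adj_of_pair t a b c hp hs this
    · exact adjB_cons a t (ih (List.pairwise_cons.mp hp).2 h)

theorem goodB_eq_adjB (l : List Int) (hp : l.Pairwise (· ≤ ·)) : goodB l = adjB l := by
  by_cases h : goodB l = true
  · rw [h, adjB_of_goodB l hp h]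
  · have h' : adjB l = false := by
      by_contra hc
      exact h (goodB_of_adjB l (by revert hc; cases adjB l <;> simp))
    simp only [Bool.not_eq_true] at h
    rw [h, h']

theorem goodB_short (l : List Int) (h : l.length < 3) : goodB l = false := by
  match l, h with
  | [], _ => rfl
  | [_], _ => rfl
  | [a, b], _ => simp [goodB, pvInnerB]

-- A's scan from index k computes the adjacent-triple scan of the dropped list
theorem scanA_drop (S : List Int) :
    ∀ (n k : Nat), S.length - k = n →
      pvScanA S (PySem.List.pyRange (k : Int) ((S.length : Int) - 2)) =
        (if adjB (S.drop k) then 1 else 0) := by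
  intro n
  induction n with
  | zero =>
    intro k hk
    have hlen : S.length ≤ k := by omega
    rw [PySem.List.pyRange_one_eq_nil (by omega)]
    rw [List.drop_eq_nil_of_le hlen]
    rfl
  | succ n ih =>
    intro k hk
    by_cases h : (k : Int) < (S.length : Int) - 2
    · have hk0 : k < S.length := by omega
      have hk1 : k + 1 < S.length := by omega
      have hk2 : k + 2 < S.length := by omega
      rw [PySem.List.pyRange_one_cons h]
      show (let a := PySem.List.pyGetD S (k : Int) 0
            let b := PySem.List.pyGetD S ((k : Int) + 1) 0
            let c := PySem.List.pyGetD S ((k : Int) + 2) 0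
            if a < b + c ∧ b < a + c ∧ c < b + a then 1
            else pvScanA S (PySem.List.pyRange ((k : Int) + 1) ((S.length : Int) - 2))) = _
      have e1 : PySem.List.pyGetD S (k : Int) 0 = S[k] := by
        rw [PySem.List.pyGetD_natCast]; exact List.getD_eq_getElem _ _ hk0
      have e2 : PySem.List.pyGetD S ((k : Int) + 1) 0 = S[k + 1] := by
        rw [show ((k : Int) + 1) = ((k + 1 : Nat) : Int) by push_cast; ring,
          PySem.List.pyGetD_natCast]
        exact List.getD_eq_getElem _ _ hk1
      have e3 : PySem.List.pyGetD S ((k : Int) + 2) 0 = S[k + 2] := by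
        rw [show ((k : Int) + 2) = ((k + 2 : Nat) : Int) by push_cast; ring,
          PySem.List.pyGetD_natCast]
        exact List.getD_eq_getElem _ _ hk2
      have hrec : pvScanA S (PySem.List.pyRange ((k : Int) + 1) ((S.length : Int) - 2)) =
          (if adjB (S.drop (k + 1)) then 1 else 0) := by
        rw [show ((k : Int) + 1) = ((k + 1 : Nat) : Int) by push_cast; ring]
        exact ih (k + 1) (by omega)
      have hdrop : S.drop k = S[k] :: S[k + 1] :: S[k + 2] :: S.drop (k + 3) := by
        rw [List.drop_eq_getElem_cons hk0, List.drop_eq_getElem_cons hk1,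
          List.drop_eq_getElem_cons hk2]
      simp only [e1, e2, e3, hrec, hdrop, adjB]
      rw [← List.drop_eq_getElem_cons hk2, ← List.drop_eq_getElem_cons hk1]
      by_cases htri : pvTriB S[k] S[k + 1] S[k + 2] = true
      · have hc : S[k] < S[k + 1] + S[k + 2] ∧ S[k + 1] < S[k] + S[k + 2] ∧
            S[k + 2] < S[k + 1] + S[k] := by
          rw [pvTriB_eq_decide] at htri; simp only [decide_eq_true_eq] at htri; omega
        simp [hc, htri]
      · have hc : ¬(S[k] < S[k + 1] + S[k + 2] ∧ S[k + 1] < S[k] + S[k + 2] ∧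
            S[k + 2] < S[k + 1] + S[k]) := by
          rw [pvTriB_eq_decide] at htri; simp only [decide_eq_true_eq] at htri; omega
        simp only [Bool.not_eq_true] at htri
        simp [hc, htri]
    · rw [PySem.List.pyRange_one_eq_nil (by omega)]
      rw [adjB_short _ (by rw [List.length_drop]; omega)]
      rfl

-- ===== VERDICT (by name: the statement is the Claim_ definition above) =====
theorem solution_spec : Claim_equal_solution := by
  intro A _
  unfold Spec_solution solution
  rw [solution_alt_eq_goodB]
  by_cases h : (A.length : Int) < 3
  · rw [goodB_short A (by omega)]
    simp [h]
  · simp only [h, if_false]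
    set S := PySem.List.sorted A (fun x => x) with hS
    have hperm : S.Perm A := PySem.List.sorted_perm A (fun x => x) false
    have hlen : S.length = A.length := hperm.length_eq
    have hp : S.Pairwise (· ≤ ·) := PySem.List.sorted_pairwise A (fun x => x)
    rw [← hlen, show (0 : Int) = ((0 : Nat) : Int) from rfl]
    rw [scanA_drop S (S.length - 0) 0 rfl, List.drop_zero]
    rw [← goodB_eq_adjB S hp, goodB_perm hperm]
    norm_num
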